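-- pv_equiv track=rewrite | github.com/gabeclasson/wordle-analysis | Wordle.py | num_yellows
-- ===== SOURCE A (Python) =====
-- def num_greens(guess, true_word):
--     greens = 0
--     for guess_letter, true_letter in zip(guess, true_word):
--         if guess_letter == true_letter:
--             greens += 1
--     return greens
--
-- def num_yellows(guess, true_word):
--     def in_common(word, other):
--         sum = 0
--         for letter in word:
--             if letter in other:
--                 sum += 1
--                 other.remove(letter)
--         return sum
--
--     return in_common(guess, list(true_word)) - num_greens(guess, true_word)
-- ===== SOURCE B (Python) =====
-- def num_yellows(guess, true_word):
--     g = sorted(guess)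
--     t = sorted(true_word)
--     i = j = common = 0
--     while i < len(g) and j < len(t):
--         if g[i] == t[j]:
--             common += 1
--             i += 1
--             j += 1
--         elif g[i] < t[j]:
--             i += 1
--         else:
--             j += 1
--     greens = sum(1 for a, b in zip(guess, true_word) if a == b)
--     return common - greens
-- ===== Notes on version B (the rewrite author's own statement) =====
-- stated objective: faster
-- what changed: Replaces the scan-and-remove multiset intersection (each guess letter searched for and removed from a copy of true_word, O(n*m)) by sorting both letter sequences and counting common letters with a single two-pointer merge (O(n log n + m log m)).
import Mathlib
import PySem

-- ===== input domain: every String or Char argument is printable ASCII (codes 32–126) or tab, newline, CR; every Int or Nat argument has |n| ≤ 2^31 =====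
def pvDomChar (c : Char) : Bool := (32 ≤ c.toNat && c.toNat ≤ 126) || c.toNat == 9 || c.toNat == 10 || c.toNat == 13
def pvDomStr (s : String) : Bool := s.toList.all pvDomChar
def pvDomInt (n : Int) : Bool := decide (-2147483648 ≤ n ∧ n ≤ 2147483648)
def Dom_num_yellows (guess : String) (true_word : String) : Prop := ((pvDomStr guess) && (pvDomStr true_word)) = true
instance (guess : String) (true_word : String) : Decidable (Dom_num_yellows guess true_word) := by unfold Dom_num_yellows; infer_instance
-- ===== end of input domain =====

-- B changes the common-letter count from A's scan-and-remove over a shrinking copy of true_word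
-- to a sort-then-two-pointer merge over both letter sequences (objective: faster).

-- ===== PORT A =====
-- num_greens: loop over zip(guess, true_word) accumulating greens
def numGreensA (g t : List Char) : Int :=
  (g.zip t).foldl (fun acc p => if p.1 = p.2 then acc + 1 else acc) 0

-- in_common: for letter in word: if letter in other: sum += 1; other.remove(letter)
-- other.remove(letter) is guarded by 'letter in other', so it is exactly List.erase
-- (PySem.List.remove?_eq_some_erase).
def inCommonA : List Char → List Char → Int
  | [], _ => 0
  | l :: ls, other =>
      if l ∈ other then 1 + inCommonA ls (other.erase l) else inCommonA ls other

def num_yellows (guess : String) (true_word : String) : Int :=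
  inCommonA guess.toList true_word.toList - numGreensA guess.toList true_word.toList

-- ===== PORT B =====
-- the two-pointer merge over the two sorted character lists
def mergeCountB : List Char → List Char → Int
  | [], _ => 0
  | _ :: _, [] => 0
  | a :: as, b :: bs =>
      if a = b then 1 + mergeCountB as bs
      else if a < b then mergeCountB as (b :: bs)
      else mergeCountB (a :: as) bs
termination_by xs ys => xs.length + ys.length

def num_yellows_alt (guess : String) (true_word : String) : Int :=
  mergeCountB (PySem.List.sorted guess.toList (fun x => x) false)
              (PySem.List.sorted true_word.toList (fun x => x) false)
    - (((guess.toList.zip true_word.toList).filter (fun p => decide (p.1 = p.2))).length : Int)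

-- ===== PRECONDITION & SPEC =====
def Spec_num_yellows (guess : String) (true_word : String) (out : Int) : Prop := out = num_yellows_alt guess true_word
instance (guess : String) (true_word : String) (out : Int) : Decidable (Spec_num_yellows guess true_word out) := by unfold Spec_num_yellows; infer_instance

-- ===== CLAIM (what is proved, stated in full; the proofs are below) =====
def Claim_equal_num_yellows : Prop := ∀ (guess : String) (true_word : String), Dom_num_yellows guess true_word → Spec_num_yellows guess true_word (num_yellows guess true_word)

-- ===== LEMMAS AND PROOFS =====

-- A's scan-and-remove loop computes the size of the multiset intersection.
theorem inCommonA_eq_card (w o : List Char) :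
    inCommonA w o = (((w : Multiset Char) ∩ (o : Multiset Char)).card : Int) := by
  induction w generalizing o with
  | nil => simp [inCommonA]
  | cons l ls ih =>
      by_cases h : l ∈ o
      · rw [inCommonA, if_pos h, ih]
        rw [show ((l :: ls : List Char) : Multiset Char) = l ::ₘ (ls : Multiset Char) from rfl,
          Multiset.cons_inter_of_pos _ (by simpa using h)]
        simp
        ring
      · rw [inCommonA, if_neg h, ih]
        rw [show ((l :: ls : List Char) : Multiset Char) = l ::ₘ (ls : Multiset Char) from rfl,
          Multiset.cons_inter_of_neg _ (by simpa using h)]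

-- B's merge over two sorted lists computes the size of the multiset intersection.
theorem mergeCountB_eq_card (xs ys : List Char)
    (hx : xs.Pairwise (· ≤ ·)) (hy : ys.Pairwise (· ≤ ·)) :
    mergeCountB xs ys = (((xs : Multiset Char) ∩ (ys : Multiset Char)).card : Int) := by
  induction xs, ys using mergeCountB.induct with
  | case1 ys => simp [mergeCountB]
  | case2 a as => simp [mergeCountB]
  | case3 as b bs ih =>
      rw [mergeCountB, if_pos rfl, ih hx.tail hy.tail]
      rw [show ((b :: as : List Char) : Multiset Char) = b ::ₘ (as : Multiset Char) from rfl,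
        show ((b :: bs : List Char) : Multiset Char) = b ::ₘ (bs : Multiset Char) from rfl,
        Multiset.cons_inter_of_pos _ (Multiset.mem_cons_self b _),
        Multiset.erase_cons_head]
      simp
      ring
  | case4 a as b bs hne hlt ih =>
      have hnot : a ∉ (b :: bs) := by
        intro hmem
        rcases List.mem_cons.mp hmem with h | h
        · exact hne h
        · exact absurd hlt (not_lt.mpr (List.rel_of_pairwise_cons hy h))
      rw [mergeCountB, if_neg hne, if_pos hlt, ih hx.tail hy]
      rw [show ((a :: as : List Char) : Multiset Char) = a ::ₘ (as : Multiset Char) from rfl,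
        Multiset.cons_inter_of_neg _ (by simpa using hnot)]
  | case5 a as b bs hne hnlt ih =>
      have hba : b < a := lt_of_le_of_ne (not_lt.mp hnlt) (fun h => hne h.symm)
      have hnot : b ∉ (a :: as) := by
        intro hmem
        rcases List.mem_cons.mp hmem with h | h
        · exact absurd h (ne_of_lt hba)
        · exact absurd (List.rel_of_pairwise_cons hx h) (not_le.mpr hba)
      have h2 : ((a :: as : List Char) : Multiset Char) ∩ ((b :: bs : List Char) : Multiset Char)
          = ((a :: as : List Char) : Multiset Char) ∩ ((bs : List Char) : Multiset Char) := by
        rw [Multiset.inter_comm,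
          show ((b :: bs : List Char) : Multiset Char) = b ::ₘ (bs : Multiset Char) from rfl,
          Multiset.cons_inter_of_neg _ (by simpa using hnot), Multiset.inter_comm]
      rw [mergeCountB, if_neg hne, if_neg hnlt, ih hx hy.tail, h2]

-- A's green-counting fold equals B's filtered-zip length.
theorem greens_fold_eq (l : List (Char × Char)) (acc : Int) :
    l.foldl (fun acc p => if p.1 = p.2 then acc + 1 else acc) acc
      = acc + ((l.filter (fun p => decide (p.1 = p.2))).length : Int) := by
  induction l generalizing acc with
  | nil => simp
  | cons p ps ih =>
      by_cases h : p.1 = p.2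
      · simp [List.foldl, List.filter, h, ih]; ring
      · simp [List.foldl, List.filter, h, ih]

-- ===== VERDICT (by name: the statement is the Claim_ definition above) =====
theorem num_yellows_spec : Claim_equal_num_yellows := by
  intro guess true_word _
  show num_yellows guess true_word = num_yellows_alt guess true_word
  unfold num_yellows num_yellows_alt numGreensA
  rw [greens_fold_eq, inCommonA_eq_card,
    mergeCountB_eq_card _ _
      (by simpa using PySem.List.sorted_pairwise guess.toList (fun x => x))
      (by simpa using PySem.List.sorted_pairwise true_word.toList (fun x => x)),
    Multiset.coe_eq_coe.mpr (PySem.List.sorted_perm guess.toList (fun x => x) false),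
    Multiset.coe_eq_coe.mpr (PySem.List.sorted_perm true_word.toList (fun x => x) false)]
  ring
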